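-- pv_equiv track=rewrite | github.com/tychospadaro/Projects | FileDifferences/file_diffs.py | singleline_diff
-- ===== SOURCE A (Python) =====
-- IDENTICAL = -1
--
-- def singleline_diff(line1, line2):
--     """
--     Inputs:
--       line1 - first single line string
--       line2 - second single line string
--     Output:
--       Returns the index where the first difference between
--       line1 and line2 occurs.
--
--       Returns IDENTICAL if the two lines are the same.
--     """
--     shorter_length = min(len(line1),len(line2))
--     # Check for mismatch over length of shorter string
--     for index in range(shorter_length):
--         if line1[index] != line2[index]:
--             return index
--
--     same_length = (len(line1) == len(line2))
--     # If no mismatch is found over length of shorter string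
--     if not same_length:
--         return shorter_length
--     else:
--         return IDENTICAL
-- ===== SOURCE B (Python) =====
-- IDENTICAL = -1
--
-- def singleline_diff(line1, line2):
--     # Binary search for the largest k with line1[:k] == line2[:k].
--     # Prefix equality is downward closed in k, so the predicate is monotone.
--     lo, hi = 0, min(len(line1), len(line2))
--     while lo < hi:
--         mid = (lo + hi + 1) // 2
--         if line1[:mid] == line2[:mid]:
--             lo = mid
--         else:
--             hi = mid - 1
--     if lo == len(line1) == len(line2):
--         return IDENTICAL
--     return lo
-- ===== Notes on version B (the rewrite author's own statement) =====
-- stated objective: alternative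
-- what changed: B replaces A's char-by-char linear scan with a binary search over prefix lengths using whole-slice equality tests (largest k with line1[:k]==line2[:k]), then derives IDENTICAL from the length check.
import Mathlib
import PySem

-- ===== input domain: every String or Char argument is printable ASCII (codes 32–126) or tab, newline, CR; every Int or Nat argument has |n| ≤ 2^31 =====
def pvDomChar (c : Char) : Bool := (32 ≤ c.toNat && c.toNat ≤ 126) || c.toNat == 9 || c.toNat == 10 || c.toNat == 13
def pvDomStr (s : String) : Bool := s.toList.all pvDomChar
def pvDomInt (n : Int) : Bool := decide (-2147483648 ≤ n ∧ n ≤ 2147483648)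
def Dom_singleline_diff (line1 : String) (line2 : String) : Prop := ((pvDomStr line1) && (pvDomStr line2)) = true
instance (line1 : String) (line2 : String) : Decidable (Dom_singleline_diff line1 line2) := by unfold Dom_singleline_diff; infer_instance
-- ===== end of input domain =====

-- B replaces A's char-by-char scan with a binary search over prefix lengths via slice equality (alternative algorithm, same interface).


-- ===== PORT A =====
-- A's 'for index in range(shorter_length): if line1[index] != line2[index]: return index'
def pvAFind (l1 l2 : List Char) (s i : Nat) : Option Nat :=
  if _h : i < s then
    if l1[i]? ≠ l2[i]? then some i else pvAFind l1 l2 s (i + 1)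
  else none
termination_by s - i

def singleline_diff (line1 : String) (line2 : String) : Int :=
  let l1 := line1.toList
  let l2 := line2.toList
  let shorter := min l1.length l2.length
  match pvAFind l1 l2 shorter 0 with
  | some j => (j : Int)
  | none => if l1.length = l2.length then (-1 : Int) else (shorter : Int)

-- ===== PORT B =====
-- B's 'while lo < hi: mid = (lo+hi+1)//2; if line1[:mid] == line2[:mid]: lo = mid else: hi = mid-1'
-- (the slice s[:mid] with 0 ≤ mid is exactly List.take mid on s.toList)
def pvLcpSearch (l1 l2 : List Char) (lo hi : Nat) : Nat :=
  if _h : lo < hi then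
    -- mid = (lo + hi + 1) // 2, written inline
    if l1.take ((lo + hi + 1) / 2) = l2.take ((lo + hi + 1) / 2) then
      pvLcpSearch l1 l2 ((lo + hi + 1) / 2) hi
    else pvLcpSearch l1 l2 lo ((lo + hi + 1) / 2 - 1)
  else lo
termination_by hi - lo
decreasing_by all_goals omega

def singleline_diff_alt (line1 : String) (line2 : String) : Int :=
  let l1 := line1.toList
  let l2 := line2.toList
  let k := pvLcpSearch l1 l2 0 (min l1.length l2.length)
  if k = l1.length ∧ k = l2.length then (-1 : Int) else (k : Int)

-- ===== PRECONDITION & SPEC =====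
def Spec_singleline_diff (line1 : String) (line2 : String) (out : Int) : Prop := out = singleline_diff_alt line1 line2
instance (line1 : String) (line2 : String) (out : Int) : Decidable (Spec_singleline_diff line1 line2 out) := by unfold Spec_singleline_diff; infer_instance

-- ===== CLAIM (what is proved, stated in full; the proofs are below) =====
def Claim_equal_singleline_diff : Prop := ∀ (line1 : String) (line2 : String), Dom_singleline_diff line1 line2 → Spec_singleline_diff line1 line2 (singleline_diff line1 line2)

-- ===== LEMMAS AND PROOFS =====

-- prefix equality is downward closed
theorem take_eq_mono {l1 l2 : List Char} {k j : Nat} (h : l1.take k = l2.take k) (hj : j ≤ k) :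
    l1.take j = l2.take j := by
  have := congrArg (List.take j) h
  simpa [List.take_take, Nat.min_eq_left hj] using this

-- prefix equality extends by one matching character
theorem take_succ_of_eq {l1 l2 : List Char} {k : Nat} (h : l1.take k = l2.take k)
    (hc : l1[k]? = l2[k]?) : l1.take (k + 1) = l2.take (k + 1) := by
  rw [List.take_add_one, List.take_add_one, h, hc]

-- a one-longer equal prefix forces the characters to match
theorem get_eq_of_take_succ {l1 l2 : List Char} {k : Nat}
    (h : l1.take (k + 1) = l2.take (k + 1)) (h1 : k < l1.length) (h2 : k < l2.length) :
    l1[k]? = l2[k]? := by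
  have hk : l1.take k = l2.take k := take_eq_mono h (Nat.le_succ k)
  rw [List.take_add_one, List.take_add_one, hk] at h
  have hs := List.append_cancel_left h
  rw [List.getElem?_eq_getElem h1, List.getElem?_eq_getElem h2] at hs ⊢
  simpa using hs

-- if A's scan from i (with equal prefix up to i) returns some j, then the j-prefixes are
-- equal, the characters at j differ, and j < s
theorem pvAFind_some {l1 l2 : List Char} {s i j : Nat}
    (hpre : l1.take i = l2.take i) (h : pvAFind l1 l2 s i = some j) :
    l1.take j = l2.take j ∧ l1[j]? ≠ l2[j]? ∧ j < s := by
  unfold pvAFind at h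
  split at h
  · rename_i hi
    split at h
    · rename_i hne
      cases h
      exact ⟨hpre, hne, hi⟩
    · rename_i heq
      push Not at heq
      exact pvAFind_some (take_succ_of_eq hpre heq) h
  · cases h
termination_by s - i

-- if A's scan from i (with equal prefix up to i, i ≤ s) finds nothing, the s-prefixes are equal
theorem pvAFind_none {l1 l2 : List Char} {s i : Nat} (hi : i ≤ s)
    (hpre : l1.take i = l2.take i) (h : pvAFind l1 l2 s i = none) :
    l1.take s = l2.take s := by
  unfold pvAFind at h
  split at h
  · rename_i hlt
    split at h
    · cases h
    · rename_i heq
      push Not at heq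
      exact pvAFind_none hlt (take_succ_of_eq hpre heq) h
  · rename_i hge
    have : i = s := by omega
    exact this ▸ hpre
termination_by s - i

-- correctness of the binary search: given the invariant (equal lo-prefix, every k with an
-- equal prefix and k ≤ min is ≤ hi), the result is the maximal such k
theorem pvLcpSearch_spec (l1 l2 : List Char) (lo hi : Nat)
    (hle : lo ≤ hi) (hhi : hi ≤ min l1.length l2.length)
    (hp : l1.take lo = l2.take lo)
    (hub : ∀ k, k ≤ min l1.length l2.length → l1.take k = l2.take k → k ≤ hi) :
    l1.take (pvLcpSearch l1 l2 lo hi) = l2.take (pvLcpSearch l1 l2 lo hi) ∧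
    pvLcpSearch l1 l2 lo hi ≤ min l1.length l2.length ∧
    (∀ k, k ≤ min l1.length l2.length → l1.take k = l2.take k → k ≤ pvLcpSearch l1 l2 lo hi) := by
  unfold pvLcpSearch
  split
  · rename_i hlt
    split
    · rename_i hmid
      exact pvLcpSearch_spec l1 l2 _ hi (by omega) hhi hmid hub
    · rename_i hmid
      refine pvLcpSearch_spec l1 l2 lo _ (by omega) (by omega) hp ?_
      intro k hk hkeq
      by_contra hgt
      push Not at hgt
      exact hmid (take_eq_mono hkeq (by omega))
  · rename_i hge
    exact ⟨hp, le_trans hle hhi, fun k hk hkeq => by have := hub k hk hkeq; omega⟩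
termination_by hi - lo
decreasing_by all_goals omega

-- the core equality at the list level (both bodies written out)
theorem pvMain (l1 l2 : List Char) :
    (match pvAFind l1 l2 (min l1.length l2.length) 0 with
      | some j => (j : Int)
      | none => if l1.length = l2.length then (-1 : Int) else ((min l1.length l2.length : Nat) : Int))
    = (if pvLcpSearch l1 l2 0 (min l1.length l2.length) = l1.length ∧
          pvLcpSearch l1 l2 0 (min l1.length l2.length) = l2.length then (-1 : Int)
       else (pvLcpSearch l1 l2 0 (min l1.length l2.length) : Int)) := by
  obtain ⟨hr, hrm, hmax⟩ := pvLcpSearch_spec l1 l2 0 (min l1.length l2.length)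
    (Nat.zero_le _) le_rfl (by simp) (fun k hk _ => hk)
  rcases hfind : pvAFind l1 l2 (min l1.length l2.length) 0 with _ | j
  · -- no mismatch: the min-prefixes are equal, so the search result is min
    have hall := pvAFind_none (Nat.zero_le _) (by simp) hfind
    have hrem : pvLcpSearch l1 l2 0 (min l1.length l2.length) = min l1.length l2.length :=
      le_antisymm hrm (hmax _ le_rfl hall)
    simp only [hfind]
    by_cases hlen : l1.length = l2.length
    · rw [if_pos hlen, if_pos ⟨by omega, by omega⟩]
    · rw [if_neg hlen, if_neg (by rintro ⟨a, b⟩; exact hlen (by omega)), hrem]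
  · -- mismatch at j: the search result is exactly j, and j < min
    obtain ⟨hj, hne, hjm⟩ := pvAFind_some (by simp) hfind
    have hub : pvLcpSearch l1 l2 0 (min l1.length l2.length) ≤ j := by
      by_contra hgt
      push Not at hgt
      exact hne (get_eq_of_take_succ (take_eq_mono hr (by omega)) (by omega) (by omega))
    have hrj : pvLcpSearch l1 l2 0 (min l1.length l2.length) = j :=
      le_antisymm hub (hmax j (by omega) hj)
    simp only [hfind]
    rw [if_neg (by rintro ⟨a, _⟩; omega), hrj]

-- ===== VERDICT (by name: the statement is the Claim_ definition above) =====
theorem singleline_diff_spec : Claim_equal_singleline_diff := by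
  intro line1 line2 _
  exact pvMain line1.toList line2.toList
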